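-- pv_equiv track=rewrite | github.com/gomin0/algorithm-study | 프로그래머스/3/12920. 선입 선출 스케줄링/선입 선출 스케줄링.py | solution
-- ===== SOURCE A (Python) =====
-- def solution(n, cores):
--     if n <= len(cores):
--         return n
--
--     left, right = 0, max(cores) * n
--     while left < right:
--         mid = (left + right) // 2
--         finish = sum(1 + (mid // c) for c in cores)
--         if finish >= n:
--             right = mid
--         else:
--             left = mid + 1
--     time = left
--
--     finish_before_time = sum(1 + (time - 1) // c for c in cores)
--
--     for i, c in enumerate(cores):
--         if time % c == 0:
--             finish_before_time +=1
--             if finish_before_time == n: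
--                 return i+1
-- ===== SOURCE B (Python) =====
-- def solution(n, cores):
--     # Direct discrete-event simulation: repeatedly hand the next job to the
--     # core that becomes free first (ties -> lowest index); the core taking the
--     # n-th job is the answer.  An exact integer fast-forward (all jobs that
--     # certainly start before time t0) keeps the simulated tail short.
--     m = len(cores)
--     if n <= m:
--         return n
--     D = 1
--     for c in cores:
--         D *= c
--     S = sum(D // c for c in cores)
--     t0 = max(0, ((n - m) * D) // S)   # before t0, fewer than n jobs have started
--     free = [((t0 + c - 1) // c) * c for c in cores]   # each core's next start >= t0
--     done = sum((t0 + c - 1) // c for c in cores)      # jobs started strictly before t0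
--     last = -1
--     for _ in range(n - done):
--         best, bt = 0, free[0]
--         for i, t in enumerate(free):
--             if t < bt:
--                 best, bt = i, t
--         free[best] = bt + cores[best]
--         last = best
--     return last + 1
-- ===== Notes on version B (the rewrite author's own statement) =====
-- stated objective: alternative
-- what changed: Replaces A's binary search over the finish time (plus a closing scan for the crossing core) by a discrete-event simulation that hands each job to the core that becomes free first (ties to the lowest index), with an exact integer fast-forward (jobs certainly started before t0 = ((n-m)*prod(cores))//sum(prod/c)) so only O(m) tail jobs are simulated.
-- outside the precondition, e.g. on solution(11, [1, -5]): A returns 1, B returns 2; on solution(2, [0]): A raises ZeroDivisionError, B raises ZeroDivisionError; on solution(5, []): A raises ValueError, B raises ZeroDivisionError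
import Mathlib
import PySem

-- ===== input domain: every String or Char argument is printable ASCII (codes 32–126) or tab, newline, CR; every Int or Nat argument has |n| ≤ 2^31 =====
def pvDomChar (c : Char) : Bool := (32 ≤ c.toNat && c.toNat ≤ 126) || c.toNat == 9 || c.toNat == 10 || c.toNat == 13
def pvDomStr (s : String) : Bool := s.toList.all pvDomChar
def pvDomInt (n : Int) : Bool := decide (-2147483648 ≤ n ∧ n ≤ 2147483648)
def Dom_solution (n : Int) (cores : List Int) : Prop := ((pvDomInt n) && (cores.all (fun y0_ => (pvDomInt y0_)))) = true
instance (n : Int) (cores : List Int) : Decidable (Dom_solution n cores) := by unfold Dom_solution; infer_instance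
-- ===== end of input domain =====

-- B replaces A's binary search over the finish time by a direct job-by-job simulation
-- (next job goes to the first core to become free, ties to the lowest index); equal on
-- Pre_solution (an alternative decomposition, not claimed faster).

-- ===== PORT A =====

-- finish = sum(1 + (t // c) for c in cores)
def pvFinish (cores : List Int) (t : Int) : Int :=
  (cores.map (fun c => 1 + PySem.Int.floordiv t c)).sum

-- the while-loop of A's binary search
def pvBS (n : Int) (cores : List Int) (left right : Int) : Int :=
  if h : left < right then
    if n ≤ pvFinish cores (PySem.Int.floordiv (left + right) 2) then
      pvBS n cores left (PySem.Int.floordiv (left + right) 2)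
    else
      pvBS n cores (PySem.Int.floordiv (left + right) 2 + 1) right
  else left
termination_by (right - left).toNat
decreasing_by
  · have hm : PySem.Int.floordiv (left + right) 2 = (left + right) / 2 :=
      PySem.Int.floordiv_eq_ediv_of_pos (by norm_num)
    rw [hm]; omega
  · have hm : PySem.Int.floordiv (left + right) 2 = (left + right) / 2 :=
      PySem.Int.floordiv_eq_ediv_of_pos (by norm_num)
    rw [hm]; omega

-- the final 'for i, c in enumerate(cores)' loop of A
def pvFind (n time : Int) : List Int → Int → Int → Int
  | [], _, _ => 0    -- Python: the loop ends and A returns None here; unreachable under Pre_solution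
  | c :: rest, i, cnt =>
    if PySem.Int.mod time c = 0 then
      (if cnt + 1 = n then i + 1 else pvFind n time rest (i + 1) (cnt + 1))
    else pvFind n time rest (i + 1) cnt

def solution (n : Int) (cores : List Int) : Int :=
  if n ≤ (cores.length : Int) then n
  else
    -- max(cores): none (Python ValueError) only on [], which Pre_solution excludes
    let right := ((PySem.List.max? cores (fun c => c)).getD 0) * n
    let time := pvBS n cores 0 right
    pvFind n time cores 0 (pvFinish cores (time - 1))

-- ===== PORT B =====

-- best, bt = 0, free[0]; for i, t in enumerate(free): if t < bt: best, bt = i, t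
def pvScan (free : List Int) : Int × Int :=
  (PySem.List.enumerate free 0).foldl
    (fun b p => if p.2 < b.2 then p else b)
    (0, PySem.List.pyGetD free 0 0)   -- free[0]: IndexError only on [], outside Pre_solution

-- one iteration of B's outer loop; best is an enumerate index, hence ≥ 0, so .toNat is exact
def pvStep (cores : List Int) (st : List Int × Int) : List Int × Int :=
  match pvScan st.1 with
  | (best, bt) => (st.1.set best.toNat (bt + PySem.List.pyGetD cores best 0), best)

def solution_alt (n : Int) (cores : List Int) : Int :=
  if n ≤ (cores.length : Int) then n
  else
    -- exact integer fast-forward: before time t0, fewer than n jobs have started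
    let D := cores.foldl (fun acc c => acc * c) 1
    let S := (cores.map (fun c => PySem.Int.floordiv D c)).sum   -- D // c: ZeroDivisionError only outside Pre_
    let t0 := max 0 (PySem.Int.floordiv ((n - (cores.length : Int)) * D) S)
    let free0 := cores.map (fun c => PySem.Int.floordiv (t0 + c - 1) c * c)
    let done := (cores.map (fun c => PySem.Int.floordiv (t0 + c - 1) c)).sum
    let fin := (PySem.List.pyRange 0 (n - done) 1).foldl (fun st _ => pvStep cores st)
                 (free0, -1)
    fin.2 + 1

-- ===== PRECONDITION & SPEC =====
-- When the scheduling path is taken (len(cores) < n), Pre_ excludes the empty core list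
-- (A's max([]) raises ValueError, B's free[0] raises IndexError) and nonpositive core
-- speeds (a zero speed makes A divide by zero; negative speeds are outside the task's
-- natural domain and A's value there, when it returns one, is an artefact of floor
-- division by a negative divisor).
def Pre_solution (n : Int) (cores : List Int) : Prop :=
  (cores.length : Int) < n → (cores ≠ [] ∧ ∀ c ∈ cores, 1 ≤ c)
instance (n : Int) (cores : List Int) : Decidable (Pre_solution n cores) := by
  unfold Pre_solution; infer_instance

def pvWitness_solution : Int × List Int := (6, [1, 2, 3])

def Spec_solution (n : Int) (cores : List Int) (out : Int) : Prop := out = solution_alt n cores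
instance (n : Int) (cores : List Int) (out : Int) : Decidable (Spec_solution n cores out) := by
  unfold Spec_solution; infer_instance

-- ===== CLAIM (what is proved, stated in full; the proofs are below) =====
def Claim_equal_solution : Prop := ∀ (n : Int) (cores : List Int), Dom_solution n cores → Pre_solution n cores → Spec_solution n cores (solution n cores)

-- ===== LEMMAS AND PROOFS =====

-- ---- the arithmetic layer: floor division by a positive divisor ----

theorem pv_fd_eq {c a q : Int} (hc : 1 ≤ c) (h1 : q * c ≤ a) (h2 : a < (q + 1) * c) :
    PySem.Int.floordiv a c = q :=
  (PySem.Int.floordiv_eq_iff_of_pos (by omega)).2 ⟨h1, h2⟩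

theorem pv_fd_bounds {c a : Int} (hc : 1 ≤ c) :
    PySem.Int.floordiv a c * c ≤ a ∧ a < (PySem.Int.floordiv a c + 1) * c :=
  (PySem.Int.floordiv_eq_iff_of_pos (by omega)).1 rfl

theorem pv_fd_mono {c s t : Int} (hc : 1 ≤ c) (hst : s ≤ t) :
    PySem.Int.floordiv s c ≤ PySem.Int.floordiv t c := by
  have h := (pv_fd_bounds (a := s) hc).1
  exact (PySem.Int.le_floordiv_iff_mul_le (by omega)).2 (le_trans h hst)

theorem pv_fd_zero {c : Int} (hc : 1 ≤ c) : PySem.Int.floordiv 0 c = 0 :=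
  pv_fd_eq hc (by omega) (by omega)

theorem pv_fd_mul {c k : Int} (hc : 1 ≤ c) : PySem.Int.floordiv (k * c) c = k :=
  pv_fd_eq hc (by omega) (by nlinarith)

theorem pv_fd_succ_sub {c t : Int} (hc : 1 ≤ c) :
    PySem.Int.floordiv t c - PySem.Int.floordiv (t - 1) c = if c ∣ t then 1 else 0 := by
  by_cases hd : c ∣ t
  · obtain ⟨r, hr⟩ := id hd
    have h1 : PySem.Int.floordiv t c = r := by
      rw [hr, mul_comm]; exact pv_fd_mul hc
    have h2 : PySem.Int.floordiv (t - 1) c = r - 1 := by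
      apply pv_fd_eq hc <;> nlinarith
    rw [h1, h2, if_pos hd]; omega
  · have hb := pv_fd_bounds (a := t) hc
    have hne : t ≠ PySem.Int.floordiv t c * c := by
      intro h; exact hd ⟨PySem.Int.floordiv t c, by rw [mul_comm]; exact h⟩
    have h2 : PySem.Int.floordiv (t - 1) c = PySem.Int.floordiv t c := by
      apply pv_fd_eq hc <;> omega
    rw [h2, if_neg hd]; omega

-- ---- the counting layer over indices ----

def pvC (cores : List Int) (j : Nat) : Int := cores.getD j 0

def pvFm (cores : List Int) (t : Int) : Int :=
  ∑ j ∈ Finset.range cores.length, (1 + PySem.Int.floordiv t (pvC cores j))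

def pvCD (cores : List Int) (t : Int) (b : Nat) : Int :=
  ∑ j ∈ Finset.range b, (if pvC cores j ∣ t then 1 else 0)

-- rank of the event "core b starts a job at time t": number of lexicographically
-- earlier (time, core) job starts
def pvRK (cores : List Int) (t : Int) (b : Nat) : Int :=
  pvFm cores (t - 1) + pvCD cores t b

def pvHP (cores : List Int) : Prop := ∀ c ∈ cores, 1 ≤ c

theorem pvC_pos {cores : List Int} (hp : pvHP cores) {j : Nat} (hj : j < cores.length) :
    1 ≤ pvC cores j := by
  have : pvC cores j ∈ cores := by
    unfold pvC; rw [List.getD_eq_getElem _ _ hj]; exact List.getElem_mem hj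
  exact hp _ this

theorem pv_sum_map (f : Int → Int) : ∀ (l : List Int),
    (l.map f).sum = ∑ j ∈ Finset.range l.length, f (l.getD j 0) := by
  intro l
  induction l with
  | nil => simp
  | cons x xs ih =>
    simp only [List.map_cons, List.sum_cons, List.length_cons, Finset.sum_range_succ',
      List.getD_cons_succ, List.getD_cons_zero, ih]
    ring

theorem pv_finish_eq (cores : List Int) (t : Int) : pvFinish cores t = pvFm cores t := by
  unfold pvFinish pvFm pvC
  exact pv_sum_map (fun c => 1 + PySem.Int.floordiv t c) cores

theorem pvFm_mono {cores : List Int} (hp : pvHP cores) {s t : Int} (hst : s ≤ t) :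
    pvFm cores s ≤ pvFm cores t := by
  apply Finset.sum_le_sum
  intro j hj
  have := pv_fd_mono (pvC_pos hp (Finset.mem_range.1 hj)) hst
  omega

theorem pvFm_zero {cores : List Int} (hp : pvHP cores) :
    pvFm cores 0 = (cores.length : Int) := by
  unfold pvFm
  rw [Finset.sum_congr rfl (fun j hj => by
    rw [pv_fd_zero (pvC_pos hp (Finset.mem_range.1 hj))])]
  simp

theorem pvFm_succ {cores : List Int} (hp : pvHP cores) (t : Int) :
    pvFm cores t = pvFm cores (t - 1) + pvCD cores t cores.length := by
  have h : pvFm cores t - pvFm cores (t - 1) = pvCD cores t cores.length := by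
    unfold pvFm pvCD
    rw [← Finset.sum_sub_distrib]
    apply Finset.sum_congr rfl
    intro j hj
    have := pv_fd_succ_sub (t := t) (pvC_pos hp (Finset.mem_range.1 hj))
    split_ifs at this ⊢ <;> omega
  omega

theorem pvCD_nonneg (cores : List Int) (t : Int) (b : Nat) : 0 ≤ pvCD cores t b := by
  apply Finset.sum_nonneg
  intro j _
  split_ifs <;> omega

theorem pvCD_mono (cores : List Int) (t : Int) {b b' : Nat} (h : b ≤ b') :
    pvCD cores t b ≤ pvCD cores t b' := by
  apply Finset.sum_le_sum_of_subset_of_nonneg (by intro x hx; simp only [Finset.mem_range] at hx ⊢; omega)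
  intro j _ _
  split_ifs <;> omega

theorem pvFm_big {cores : List Int} (hp : pvHP cores) {M n : Int}
    (hne : cores ≠ []) (hM : ∀ c ∈ cores, c ≤ M) (hn : 1 ≤ n) :
    n ≤ pvFm cores (M * n) := by
  have hterm : ∀ j ∈ Finset.range cores.length, n ≤ 1 + PySem.Int.floordiv (M * n) (pvC cores j) := by
    intro j hj
    have hj' := Finset.mem_range.1 hj
    have hc1 : 1 ≤ pvC cores j := pvC_pos hp hj'
    have hcM : pvC cores j ≤ M := by
      apply hM
      unfold pvC; rw [List.getD_eq_getElem _ _ hj']; exact List.getElem_mem hj'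
    have : n - 1 ≤ PySem.Int.floordiv (M * n) (pvC cores j) := by
      rw [PySem.Int.le_floordiv_iff_mul_le (by omega)]
      nlinarith
    omega
  have hcard := Finset.card_nsmul_le_sum (Finset.range cores.length) _ n hterm
  rw [Finset.card_range, nsmul_eq_mul] at hcard
  have hm : 1 ≤ (cores.length : Int) := by
    have : 0 < cores.length := List.length_pos_iff.2 hne
    omega
  unfold pvFm
  nlinarith

-- strict monotonicity of rank along the lexicographic event order, hence injectivity
theorem pvRK_lt {cores : List Int} (hp : pvHP cores) {t t' : Int} {i j : Nat}
    (_ht : 0 ≤ t) (hi : i < cores.length) (hdi : pvC cores i ∣ t) (_hj : j ≤ cores.length)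
    (hlex : t < t' ∨ (t = t' ∧ i < j)) :
    pvRK cores t i < pvRK cores t' j := by
  have hCDi : pvCD cores t i + 1 = pvCD cores t (i + 1) := by
    unfold pvCD; rw [Finset.sum_range_succ, if_pos hdi]
  rcases hlex with hlt | ⟨heq, hij⟩
  · have h1 : pvRK cores t i + 1 ≤ pvFm cores t := by
      have hFs := pvFm_succ hp t
      have hmono := pvCD_mono cores t (b := i + 1) (b' := cores.length) hi
      unfold pvRK; omega
    have h2 : pvFm cores t ≤ pvFm cores (t' - 1) := pvFm_mono hp (by omega)
    have h3 : pvFm cores (t' - 1) ≤ pvRK cores t' j := by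
      have := pvCD_nonneg cores t' j
      unfold pvRK; omega
    omega
  · subst heq
    have hmono := pvCD_mono cores t (b := i + 1) (b' := j) hij
    unfold pvRK; omega

theorem pvRK_inj {cores : List Int} (hp : pvHP cores) {t t' : Int} {i j : Nat}
    (ht : 0 ≤ t) (ht' : 0 ≤ t') (hi : i < cores.length) (hj : j < cores.length)
    (hdi : pvC cores i ∣ t) (hdj : pvC cores j ∣ t')
    (h : pvRK cores t i = pvRK cores t' j) : t = t' ∧ i = j := by
  rcases lt_trichotomy t t' with hlt | heq | hgt
  · have := pvRK_lt hp ht hi hdi (le_of_lt hj) (Or.inl hlt); omega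
  · subst heq
    refine ⟨rfl, ?_⟩
    rcases lt_trichotomy i j with hij | hij | hij
    · have := pvRK_lt hp ht hi hdi (le_of_lt hj) (Or.inr ⟨rfl, hij⟩); omega
    · exact hij
    · have := pvRK_lt hp ht' hj hdj (le_of_lt hi) (Or.inr ⟨rfl, hij⟩); omega
  · have := pvRK_lt hp ht' hj hdj (le_of_lt hi) (Or.inl hgt); omega

-- ---- A's binary search ----

theorem pvBS_correct {cores : List Int} (hp : pvHP cores) {n : Int} :
    ∀ (l r : Int), 0 ≤ l → l ≤ r → n ≤ pvFm cores r →
    (∀ t, 0 ≤ t → t < l → pvFm cores t < n) →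
    0 ≤ pvBS n cores l r ∧ pvBS n cores l r ≤ r ∧ n ≤ pvFm cores (pvBS n cores l r) ∧
      (∀ t, 0 ≤ t → t < pvBS n cores l r → pvFm cores t < n) := by
  intro l r
  induction l, r using pvBS.induct n cores with
  | case1 l r hlr hle ih =>
    intro h0 _ _ hbelow
    rw [pvBS, dif_pos hlr, if_pos hle]
    have hmid : PySem.Int.floordiv (l + r) 2 = (l + r) / 2 :=
      PySem.Int.floordiv_eq_ediv_of_pos (by norm_num)
    rw [pv_finish_eq] at hle
    obtain ⟨a1, a2, a3, a4⟩ := ih h0 (by rw [hmid]; omega) hle hbelow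
    exact ⟨a1, by rw [hmid] at a2 ⊢; omega, a3, a4⟩
  | case2 l r hlr hle ih =>
    intro h0 _ hr hbelow
    rw [pvBS, dif_pos hlr, if_neg hle]
    have hmid : PySem.Int.floordiv (l + r) 2 = (l + r) / 2 :=
      PySem.Int.floordiv_eq_ediv_of_pos (by norm_num)
    rw [pv_finish_eq] at hle
    apply ih (by rw [hmid]; omega) (by rw [hmid]; omega) hr
    intro t ht0 htlt
    by_cases htl : t < l
    · exact hbelow t ht0 htl
    · have hmono := pvFm_mono (cores := cores) hp (s := t)
        (t := PySem.Int.floordiv (l + r) 2) (by omega)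
      omega
  | case3 l r hlr =>
    intro h0 hlr' hr hbelow
    rw [pvBS, dif_neg hlr]
    have : l = r := by omega
    subst this
    exact ⟨h0, le_rfl, hr, hbelow⟩

-- ---- A's closing scan ----

theorem pvFind_spec {cores : List Int} (hp : pvHP cores) {n T : Int} (_hT : 1 ≤ T)
    (hFT : n ≤ pvFm cores T) :
    ∀ (suf : List Int) (i : Nat) (cnt : Int), suf = cores.drop i → i ≤ cores.length →
      cnt = pvRK cores T i → cnt < n →
      ∃ J : Nat, pvFind n T suf (i : Int) cnt = (J : Int) + 1 ∧ J < cores.length ∧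
        pvC cores J ∣ T ∧ pvRK cores T J = n - 1 := by
  intro suf
  induction suf with
  | nil =>
    intro i cnt hdrop hile hcnt hlt
    exfalso
    have him : cores.length ≤ i := List.drop_eq_nil_iff.1 hdrop.symm
    have hieq : i = cores.length := by omega
    subst hieq
    have := pvFm_succ hp T
    unfold pvRK at hcnt
    omega
  | cons c rest ih =>
    intro i cnt hdrop hile hcnt hlt
    have hil : i < cores.length := by
      by_contra h
      rw [List.drop_eq_nil_iff.2 (by omega)] at hdrop
      simp at hdrop
    have hc0 : cores[i]? = some c := by
      have h0 := congrArg (fun l => l[0]?) hdrop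
      simpa [List.getElem?_drop] using h0.symm
    have hc : cores[i] = c := by
      rw [List.getElem?_eq_getElem hil] at hc0
      exact Option.some.inj hc0
    have hcC : pvC cores i = c := by
      unfold pvC; rw [List.getD_eq_getElem _ _ hil, hc]
    have hrest : rest = cores.drop (i + 1) := by
      have h1 := congrArg (List.drop 1) hdrop
      simpa [List.drop_drop, Nat.add_comm] using h1
    by_cases hdv : c ∣ T
    · have hmod : PySem.Int.mod T c = 0 := (PySem.Int.mod_eq_zero_iff_dvd T c).2 hdv
      have hCD : pvCD cores T (i + 1) = pvCD cores T i + 1 := by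
        unfold pvCD; rw [Finset.sum_range_succ, if_pos (hcC ▸ hdv)]
      by_cases hn : cnt + 1 = n
      · refine ⟨i, ?_, hil, hcC ▸ hdv, ?_⟩
        · simp only [pvFind]; rw [if_pos hmod, if_pos hn]
        · unfold pvRK at hcnt ⊢; omega
      · have hcnt1 : cnt + 1 = pvRK cores T (i + 1) := by
          unfold pvRK at hcnt ⊢; omega
        obtain ⟨J, hJ1, hJ2, hJ3, hJ4⟩ := ih (i + 1) (cnt + 1) hrest (by omega) hcnt1 (by omega)
        refine ⟨J, ?_, hJ2, hJ3, hJ4⟩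
        simp only [pvFind]; rw [if_pos hmod, if_neg hn]
        push_cast at hJ1
        exact hJ1
    · have hmod : ¬ PySem.Int.mod T c = 0 := fun h => hdv ((PySem.Int.mod_eq_zero_iff_dvd T c).1 h)
      have hCD : pvCD cores T (i + 1) = pvCD cores T i := by
        unfold pvCD; rw [Finset.sum_range_succ, if_neg (hcC ▸ hdv)]; omega
      have hcnt1 : cnt = pvRK cores T (i + 1) := by
        unfold pvRK at hcnt ⊢; omega
      obtain ⟨J, hJ1, hJ2, hJ3, hJ4⟩ := ih (i + 1) cnt hrest (by omega) hcnt1 (by omega)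
      refine ⟨J, ?_, hJ2, hJ3, hJ4⟩
      simp only [pvFind]; rw [if_neg hmod]
      push_cast at hJ1
      exact hJ1

-- ---- B's argmin scan ----

theorem pvScan_aux (l : List Int) : ∀ (s b t : Int),
    ((PySem.List.enumerate l s).foldl (fun b p => if p.2 < b.2 then p else b) (b, t) = (b, t) ∧
      ∀ k, k < l.length → t ≤ l.getD k 0) ∨
    (∃ k : Nat, k < l.length ∧
      (PySem.List.enumerate l s).foldl (fun b p => if p.2 < b.2 then p else b) (b, t)
        = (s + (k : Int), l.getD k 0) ∧
      l.getD k 0 < t ∧ (∀ k', k' < k → l.getD k 0 < l.getD k' 0) ∧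
      (∀ k', k' < l.length → l.getD k 0 ≤ l.getD k' 0)) := by
  induction l with
  | nil => intro s b t; left; simp [PySem.List.enumerate_nil]
  | cons x xs ih =>
    intro s b t
    simp only [PySem.List.enumerate_cons, List.foldl_cons]
    by_cases hx : x < t
    · rw [if_pos hx]
      rcases ih (s + 1) s x with ⟨heq, hall⟩ | ⟨k, hk, heq, hlt', hpre, hall⟩
      · right
        refine ⟨0, by simp, by rw [heq]; simp, by simpa using hx, by omega, ?_⟩
        intro k' hk'
        cases k' with
        | zero => simp
        | succ k'' => simpa using hall k'' (by simpa using hk')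
      · right
        refine ⟨k + 1, by simpa using hk, ?_, ?_, ?_, ?_⟩
        · rw [heq]; simp; ring_nf
        · simpa using lt_trans hlt' hx
        · intro k' hk'
          cases k' with
          | zero => simpa using hlt'
          | succ k'' => simpa using hpre k'' (by omega)
        · intro k' hk'
          cases k' with
          | zero => simpa using le_of_lt hlt'
          | succ k'' => simpa using hall k'' (by simpa using hk')
    · rw [if_neg hx]
      rcases ih (s + 1) b t with ⟨heq, hall⟩ | ⟨k, hk, heq, hlt', hpre, hall⟩
      · left
        refine ⟨heq, ?_⟩
        intro k' hk'
        cases k' with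
        | zero => simpa using le_of_not_gt hx
        | succ k'' => simpa using hall k'' (by simpa using hk')
      · right
        refine ⟨k + 1, by simpa using hk, ?_, ?_, ?_, ?_⟩
        · rw [heq]; simp; ring_nf
        · simpa using hlt'
        · intro k' hk'
          cases k' with
          | zero =>
            have := le_of_not_gt hx
            simpa using lt_of_lt_of_le hlt' this
          | succ k'' => simpa using hpre k'' (by omega)
        · intro k' hk'
          cases k' with
          | zero => simpa using le_of_lt (lt_of_lt_of_le hlt' (le_of_not_gt hx))
          | succ k'' => simpa using hall k'' (by simpa using hk')

theorem pvScan_spec {free : List Int} (hne : free ≠ []) :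
    ∃ B : Nat, B < free.length ∧ pvScan free = ((B : Int), free.getD B 0) ∧
      (∀ j, j < free.length → free.getD B 0 ≤ free.getD j 0) ∧
      (∀ j, j < B → free.getD B 0 < free.getD j 0) := by
  have hlen : 0 < free.length := List.length_pos_iff.2 hne
  have hinit : PySem.List.pyGetD free 0 0 = free.getD 0 0 := by
    rw [PySem.List.pyGetD_eq_getElem free 0 (by omega) (by exact_mod_cast hlen)]
    rw [List.getD_eq_getElem _ _ hlen]
    rfl
  unfold pvScan
  rw [hinit]
  rcases pvScan_aux free 0 0 (free.getD 0 0) with ⟨heq, hall⟩ | ⟨k, hk, heq, _, hpre, hall⟩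
  · exact ⟨0, hlen, by rw [heq]; simp, hall, by omega⟩
  · refine ⟨k, hk, by rw [heq]; simp, hall, hpre⟩

-- ---- B's simulation invariant ----

def pvInv (cores : List Int) (s0 s : Nat) (free : List Int) (last : Int) : Prop :=
  free.length = cores.length ∧
  (∀ j, j < cores.length → ∃ k : Nat, free.getD j 0 = (k : Int) * pvC cores j) ∧
  (∑ j ∈ Finset.range cores.length,
      PySem.Int.floordiv (free.getD j 0) (pvC cores j)) = (s : Int) ∧
  (∀ i j, i < cores.length → j < cores.length → pvC cores i ≤ free.getD i 0 →
      (free.getD i 0 - pvC cores i < free.getD j 0 ∨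
       (free.getD i 0 - pvC cores i = free.getD j 0 ∧ i < j))) ∧
  (s0 < s → ∃ b : Nat, last = (b : Int) ∧ b < cores.length ∧
      pvC cores b ≤ free.getD b 0 ∧ pvC cores b ∣ (free.getD b 0 - pvC cores b) ∧
      0 ≤ free.getD b 0 - pvC cores b ∧
      pvRK cores (free.getD b 0 - pvC cores b) b = (s : Int) - 1)

theorem pvRK_usum {cores : List Int} (hp : pvHP cores) (t : Int) {B : Nat}
    (hB : B ≤ cores.length) :
    pvRK cores t B = ∑ j ∈ Finset.range cores.length,
      (if j < B then PySem.Int.floordiv t (pvC cores j) + 1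
       else PySem.Int.floordiv (t - 1) (pvC cores j) + 1) := by
  have h2 : ∑ j ∈ Finset.range cores.length,
      (if j < B then PySem.Int.floordiv t (pvC cores j) - PySem.Int.floordiv (t - 1) (pvC cores j)
       else 0) = pvCD cores t B := by
    rw [← Finset.sum_subset (s₁ := Finset.range B)
        (by intro x hx; simp only [Finset.mem_range] at *; omega)
        (by intro x _ hnx; simp only [Finset.mem_range] at hnx; rw [if_neg (by omega)])]
    unfold pvCD
    apply Finset.sum_congr rfl
    intro j hj
    have hjB := Finset.mem_range.1 hj
    rw [if_pos hjB, pv_fd_succ_sub (pvC_pos hp (by omega))]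
  calc pvRK cores t B
      = ∑ j ∈ Finset.range cores.length, (1 + PySem.Int.floordiv (t - 1) (pvC cores j)) +
        ∑ j ∈ Finset.range cores.length,
          (if j < B then
            PySem.Int.floordiv t (pvC cores j) - PySem.Int.floordiv (t - 1) (pvC cores j)
           else 0) := by rw [h2]; rfl
    _ = _ := by
        rw [← Finset.sum_add_distrib]
        apply Finset.sum_congr rfl
        intro j _
        split_ifs with h <;> ring

theorem pvStep_inv {cores : List Int} (hp : pvHP cores) (hne : cores ≠ [])
    {s0 s : Nat} {free : List Int} {last : Int} (hinv : pvInv cores s0 s free last) :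
    pvInv cores s0 (s + 1) (pvStep cores (free, last)).1 (pvStep cores (free, last)).2 := by
  obtain ⟨hlen, hmul, hsum, hLS, _⟩ := hinv
  have hm : 0 < cores.length := List.length_pos_iff.2 hne
  have hfne : free ≠ [] := by
    intro h; rw [h] at hlen; simp at hlen; omega
  obtain ⟨B, hBf, hscan, hmin, hminlt⟩ := pvScan_spec hfne
  have hBm : B < cores.length := by omega
  have hc1 : ∀ j, j < cores.length → 1 ≤ pvC cores j := fun j hj => pvC_pos hp hj
  have hget : PySem.List.pyGetD cores (B : Int) 0 = pvC cores B := by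
    rw [PySem.List.pyGetD_eq_getElem cores 0 (by omega) (by exact_mod_cast hBm)]
    unfold pvC
    rw [List.getD_eq_getElem _ _ hBm]
    simp
  have hstep : pvStep cores (free, last) =
      (free.set B (free.getD B 0 + pvC cores B), (B : Int)) := by
    unfold pvStep
    rw [hscan]
    simp [hget]
  rw [hstep]
  have hgd : ∀ j : Nat, (free.set B (free.getD B 0 + pvC cores B)).getD j 0 =
      if j = B then free.getD B 0 + pvC cores B else free.getD j 0 := by
    intro j
    rw [List.getD_eq_getElem?_getD, List.getD_eq_getElem?_getD, List.getElem?_set]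
    by_cases hbj : B = j
    · subst hbj; rw [if_pos rfl, if_pos hBf]; simp
    · rw [if_neg hbj, if_neg (fun h => hbj h.symm), List.getD_eq_getElem?_getD]
  have hnn : ∀ j, j < cores.length → 0 ≤ free.getD j 0 := by
    intro j hj
    obtain ⟨k, hk⟩ := hmul j hj
    have h1 := hc1 j hj
    have h2 : (0 : Int) ≤ (k : Int) := Int.natCast_nonneg k
    rw [hk]; nlinarith
  obtain ⟨kB, hkB⟩ := hmul B hBm
  refine ⟨by simpa using hlen, ?_, ?_, ?_, ?_⟩
  · -- multiples
    intro j hj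
    rw [hgd]
    by_cases hjB : j = B
    · refine ⟨kB + 1, ?_⟩
      rw [if_pos hjB, hjB, hkB]
      push_cast; ring
    · rw [if_neg hjB]; exact hmul j hj
  · -- total job count
    have hterm : ∀ j ∈ Finset.range cores.length,
        PySem.Int.floordiv ((free.set B (free.getD B 0 + pvC cores B)).getD j 0)
            (pvC cores j) =
          PySem.Int.floordiv (free.getD j 0) (pvC cores j) + (if j = B then 1 else 0) := by
      intro j hj
      rw [hgd]
      by_cases hjB : j = B
      · rw [if_pos hjB, if_pos hjB, hjB, hkB]
        have h1 : PySem.Int.floordiv ((kB : Int) * pvC cores B + pvC cores B)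
            (pvC cores B) = (kB : Int) + 1 := by
          rw [show ((kB : Int) * pvC cores B + pvC cores B) =
            ((kB : Int) + 1) * pvC cores B by ring]
          exact pv_fd_mul (hc1 B hBm)
        have h2 : PySem.Int.floordiv ((kB : Int) * pvC cores B) (pvC cores B) = (kB : Int) :=
          pv_fd_mul (hc1 B hBm)
        rw [h1, h2]
      · rw [if_neg hjB, if_neg hjB]; ring
    rw [Finset.sum_congr rfl hterm, Finset.sum_add_distrib, hsum,
      Finset.sum_ite_eq' (Finset.range cores.length) B (fun _ => (1 : Int)),
      if_pos (Finset.mem_range.2 hBm)]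
    push_cast; ring
  · -- lower-set invariant
    intro i j hi hj hci
    rw [hgd] at hci
    rw [hgd, hgd]
    by_cases hiB : i = B
    · rw [if_pos hiB] at hci ⊢
      rw [hiB] at hci ⊢
      by_cases hjB : j = B
      · rw [if_pos hjB]
        left; have := hc1 B hBm; omega
      · rw [if_neg hjB]
        rcases lt_or_eq_of_le (hmin j (by omega)) with h | h
        · left; omega
        · have hBj : B < j := by
            rcases Nat.lt_or_ge B j with h1 | h1
            · exact h1
            · have hjB' : j < B := by omega
              have := hminlt j hjB'
              omega
          right; exact ⟨by omega, hBj⟩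
    · rw [if_neg hiB] at hci ⊢
      by_cases hjB : j = B
      · rw [if_pos hjB, hjB]
        rcases hLS i B hi hBm hci with h | ⟨h, _⟩ <;>
          (left; have := hc1 B hBm; omega)
      · rw [if_neg hjB]; exact hLS i j hi hj hci
  · -- the popped event and its rank
    intro _
    refine ⟨B, rfl, hBm, ?_, ?_, ?_, ?_⟩ <;> rw [hgd, if_pos rfl]
    · have := hnn B hBm; have := hc1 B hBm; omega
    · rw [show free.getD B 0 + pvC cores B - pvC cores B = free.getD B 0 by ring, hkB]
      exact dvd_mul_left (pvC cores B) (kB : Int)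
    · have := hnn B hBm; omega
    · rw [show free.getD B 0 + pvC cores B - pvC cores B = free.getD B 0 by ring]
      rw [pvRK_usum hp (free.getD B 0) (le_of_lt hBm)]
      push_cast
      rw [show ((s : Int) + 1 - 1) = (s : Int) by ring, ← hsum]
      apply Finset.sum_congr rfl
      intro j hj
      have hjm := Finset.mem_range.1 hj
      obtain ⟨kj, hkj⟩ := hmul j hjm
      have hcj := hc1 j hjm
      have hfdj : PySem.Int.floordiv (free.getD j 0) (pvC cores j) = (kj : Int) := by
        rw [hkj]; exact pv_fd_mul hcj
      rw [hfdj]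
      by_cases hjB : j < B
      · rw [if_pos hjB]
        have hklt : free.getD B 0 < (kj : Int) * pvC cores j := by
          rw [← hkj]; exact hminlt j hjB
        have hk1 : (1 : Int) ≤ (kj : Int) := by
          rcases Nat.eq_zero_or_pos kj with h0 | h1
          · exfalso
            rw [h0] at hklt
            rw [Nat.cast_zero, zero_mul] at hklt
            have := hnn B hBm; omega
          · exact_mod_cast h1
        have hciLS : pvC cores j ≤ free.getD j 0 := by rw [hkj]; nlinarith
        have hlow : ((kj : Int) - 1) * pvC cores j ≤ free.getD B 0 := by
          rcases hLS j B hjm hBm hciLS with h | ⟨h, _⟩ <;> (rw [hkj] at h; nlinarith)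
        have hfd : PySem.Int.floordiv (free.getD B 0) (pvC cores j) = (kj : Int) - 1 :=
          pv_fd_eq hcj hlow
            (by rw [show ((kj : Int) - 1 + 1) = (kj : Int) by ring]; exact hklt)
        rw [hfd]; ring
      · rw [if_neg hjB]
        by_cases hk0 : kj = 0
        · have hfj0 : free.getD j 0 = 0 := by rw [hkj, hk0]; simp
          have hfB0 : free.getD B 0 = 0 := by
            have h1 := hmin j (by omega)
            have h2 := hnn B hBm
            rw [hfj0] at h1; omega
          have hfd : PySem.Int.floordiv (free.getD B 0 - 1) (pvC cores j) = -1 :=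
            pv_fd_eq hcj (by nlinarith) (by rw [hfB0]; simp)
          rw [hfd, hk0]; simp
        · have hk1 : (1 : Int) ≤ (kj : Int) := by
            exact_mod_cast Nat.one_le_iff_ne_zero.2 hk0
          have hup : free.getD B 0 ≤ (kj : Int) * pvC cores j := by
            rw [← hkj]; exact hmin j (by omega)
          have hciLS : pvC cores j ≤ free.getD j 0 := by rw [hkj]; nlinarith
          have hlow : ((kj : Int) - 1) * pvC cores j ≤ free.getD B 0 - 1 := by
            rcases hLS j B hjm hBm hciLS with h | ⟨h, hjlt⟩
            · rw [hkj] at h; nlinarith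
            · exact absurd hjlt (by omega)
          have hfd : PySem.Int.floordiv (free.getD B 0 - 1) (pvC cores j) = (kj : Int) - 1 :=
            pv_fd_eq hcj hlow
              (by rw [show ((kj : Int) - 1 + 1) = (kj : Int) by ring]; omega)
          rw [hfd]; ring

theorem pvIter_inv {cores : List Int} (hp : pvHP cores) (hne : cores ≠ [])
    {s0 s : Nat} {free : List Int} {last : Int} (hinv : pvInv cores s0 s free last) :
    ∀ k : Nat, pvInv cores s0 (s + k)
      ((fun st => pvStep cores st)^[k] (free, last)).1
      ((fun st => pvStep cores st)^[k] (free, last)).2 := by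
  intro k
  induction k with
  | zero => simpa using hinv
  | succ k ih =>
    rw [Function.iterate_succ_apply']
    exact pvStep_inv hp hne ih

theorem pv_getD_map {g : Int → Int} {cores : List Int} {j : Nat} (hj : j < cores.length) :
    (cores.map g).getD j 0 = g (pvC cores j) := by
  rw [List.getD_eq_getElem _ _ (by simpa using hj), List.getElem_map]
  unfold pvC
  rw [List.getD_eq_getElem _ _ hj]

theorem pv_foldl_mul_ge_one {l : List Int} (hp : ∀ c ∈ l, 1 ≤ c) :
    ∀ acc : Int, 1 ≤ acc → 1 ≤ l.foldl (fun a c => a * c) acc := by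
  induction l with
  | nil => intro acc h; simpa using h
  | cons x xs ih =>
    intro acc h
    simp only [List.foldl_cons]
    have hx : 1 ≤ x := hp x List.mem_cons_self
    exact ih (fun c hc => hp c (List.mem_cons_of_mem x hc)) (acc * x) (by nlinarith)

theorem pv_dvd_foldl {c : Int} : ∀ (l : List Int) (acc : Int), c ∈ l ∨ c ∣ acc →
    c ∣ l.foldl (fun a c => a * c) acc := by
  intro l
  induction l with
  | nil => intro acc h; simpa using h.resolve_left (by simp)
  | cons x xs ih =>
    intro acc h
    simp only [List.foldl_cons]
    rcases h with hmem | hdvd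
    · rcases List.mem_cons.1 hmem with hx | hxs
      · exact ih (acc * x) (Or.inr (hx ▸ dvd_mul_left x acc))
      · exact ih (acc * x) (Or.inl hxs)
    · exact ih (acc * x) (Or.inr (hdvd.mul_right x))

-- the fast-forward start state satisfies the simulation invariant
theorem pvWarm_inv {cores : List Int} (hp : pvHP cores) {t0 : Int} (ht0 : 0 ≤ t0) :
    0 ≤ (cores.map (fun c => PySem.Int.floordiv (t0 + c - 1) c)).sum ∧
    pvInv cores ((cores.map (fun c => PySem.Int.floordiv (t0 + c - 1) c)).sum).toNat
      ((cores.map (fun c => PySem.Int.floordiv (t0 + c - 1) c)).sum).toNat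
      (cores.map (fun c => PySem.Int.floordiv (t0 + c - 1) c * c)) (-1) := by
  have hq0 : ∀ j, j < cores.length →
      0 ≤ PySem.Int.floordiv (t0 + pvC cores j - 1) (pvC cores j) := by
    intro j hj
    have hc := pvC_pos hp hj
    exact (PySem.Int.le_floordiv_iff_mul_le (by omega)).2 (by rw [zero_mul]; omega)
  have hsum : (cores.map (fun c => PySem.Int.floordiv (t0 + c - 1) c)).sum =
      ∑ j ∈ Finset.range cores.length,
        PySem.Int.floordiv (t0 + pvC cores j - 1) (pvC cores j) :=
    pv_sum_map _ cores
  have hnn : 0 ≤ (cores.map (fun c => PySem.Int.floordiv (t0 + c - 1) c)).sum := by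
    rw [hsum]
    exact Finset.sum_nonneg (fun j hj => hq0 j (Finset.mem_range.1 hj))
  refine ⟨hnn, by simp, ?_, ?_, ?_, fun h => absurd h (lt_irrefl _)⟩
  · intro j hj
    rw [pv_getD_map hj]
    refine ⟨(PySem.Int.floordiv (t0 + pvC cores j - 1) (pvC cores j)).toNat, ?_⟩
    rw [Int.toNat_of_nonneg (hq0 j hj)]
  · have hterm : ∀ j ∈ Finset.range cores.length,
        PySem.Int.floordiv
          ((cores.map (fun c => PySem.Int.floordiv (t0 + c - 1) c * c)).getD j 0)
          (pvC cores j) =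
        PySem.Int.floordiv (t0 + pvC cores j - 1) (pvC cores j) := by
      intro j hj
      rw [pv_getD_map (Finset.mem_range.1 hj)]
      exact pv_fd_mul (pvC_pos hp (Finset.mem_range.1 hj))
    rw [Finset.sum_congr rfl hterm, ← hsum, Int.toNat_of_nonneg hnn]
  · intro i j hi hj hci
    rw [pv_getD_map hi] at hci
    rw [pv_getD_map hi, pv_getD_map hj]
    left
    have hbi := pv_fd_bounds (a := t0 + pvC cores i - 1) (pvC_pos hp hi)
    have hbj := pv_fd_bounds (a := t0 + pvC cores j - 1) (pvC_pos hp hj)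
    nlinarith [hbi.1, hbj.2]

-- fewer jobs start strictly before t0 than n, so the simulated tail is nonempty
theorem pvDone_lt {cores : List Int} (hp : pvHP cores) (hne : cores ≠ []) {n D S t0 : Int}
    (hD1 : 1 ≤ D) (hdvd : ∀ c ∈ cores, c ∣ D)
    (hS : S = (cores.map (fun c => PySem.Int.floordiv D c)).sum)
    (ht0 : 0 ≤ t0) (ht0S : t0 * S ≤ (n - (cores.length : Int)) * D)
    (_hn : (cores.length : Int) < n) :
    (cores.map (fun c => PySem.Int.floordiv (t0 + c - 1) c)).sum < n := by
  have hm : 0 < cores.length := List.length_pos_iff.2 hne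
  have hper : ∀ j, j < cores.length →
      pvC cores j * PySem.Int.floordiv D (pvC cores j) = D ∧
      1 ≤ PySem.Int.floordiv D (pvC cores j) := by
    intro j hj
    have hc := pvC_pos hp hj
    have hmem : pvC cores j ∈ cores := by
      unfold pvC; rw [List.getD_eq_getElem _ _ hj]; exact List.getElem_mem hj
    obtain ⟨k, hk⟩ := hdvd (pvC cores j) hmem
    have hfdD : PySem.Int.floordiv D (pvC cores j) = k := by
      rw [hk, mul_comm]; exact pv_fd_mul hc
    have hk1 : 1 ≤ k := by nlinarith
    exact ⟨by rw [hfdD, ← hk], by rw [hfdD]; exact hk1⟩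
  have hSsum : S = ∑ j ∈ Finset.range cores.length,
      PySem.Int.floordiv D (pvC cores j) := by
    rw [hS]; exact pv_sum_map _ cores
  have hqsum : (cores.map (fun c => PySem.Int.floordiv (t0 + c - 1) c)).sum =
      ∑ j ∈ Finset.range cores.length,
        PySem.Int.floordiv (t0 + pvC cores j - 1) (pvC cores j) :=
    pv_sum_map _ cores
  have hkey : ∀ j ∈ Finset.range cores.length,
      PySem.Int.floordiv (t0 + pvC cores j - 1) (pvC cores j) * D ≤
        t0 * PySem.Int.floordiv D (pvC cores j) + D -
          PySem.Int.floordiv D (pvC cores j) := by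
    intro j hj
    have hjm := Finset.mem_range.1 hj
    have hc := pvC_pos hp hjm
    obtain ⟨hcd, hd1⟩ := hper j hjm
    have hqb := (pv_fd_bounds (a := t0 + pvC cores j - 1) hc).1
    nlinarith [mul_le_mul_of_nonneg_right hqb (by omega :
      (0 : Int) ≤ PySem.Int.floordiv D (pvC cores j))]
  have hS1 : (cores.length : Int) ≤ S := by
    rw [hSsum]
    have := Finset.card_nsmul_le_sum (Finset.range cores.length)
      (fun j => PySem.Int.floordiv D (pvC cores j)) 1
      (fun j hj => (hper j (Finset.mem_range.1 hj)).2)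
    rw [Finset.card_range, nsmul_eq_mul, mul_one] at this
    exact this
  have hle1 : (cores.map (fun c => PySem.Int.floordiv (t0 + c - 1) c)).sum * D ≤
      t0 * S + (cores.length : Int) * D - S := by
    rw [hqsum, Finset.sum_mul]
    calc ∑ j ∈ Finset.range cores.length,
          PySem.Int.floordiv (t0 + pvC cores j - 1) (pvC cores j) * D
        ≤ ∑ j ∈ Finset.range cores.length,
            (t0 * PySem.Int.floordiv D (pvC cores j) + D -
              PySem.Int.floordiv D (pvC cores j)) := Finset.sum_le_sum hkey
      _ = t0 * S + (cores.length : Int) * D - S := by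
          rw [Finset.sum_sub_distrib, Finset.sum_add_distrib, ← Finset.mul_sum,
            Finset.sum_const, Finset.card_range, nsmul_eq_mul, ← hSsum]
  have hm1 : (1 : Int) ≤ (cores.length : Int) := by exact_mod_cast hm
  have hfin : (cores.map (fun c => PySem.Int.floordiv (t0 + c - 1) c)).sum * D < n * D := by
    nlinarith
  exact lt_of_mul_lt_mul_right hfin (by omega)

theorem pv_foldl_const {α β : Type} (g : β → β) :
    ∀ (l : List α) (init : β), l.foldl (fun st _ => g st) init = g^[l.length] init := by
  intro l
  induction l with
  | nil => intro init; rfl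
  | cons x xs ih =>
    intro init
    simp only [List.foldl_cons, List.length_cons, ih (g init), Function.iterate_succ_apply]

-- ===== VERDICT (by name: the statement is the Claim_ definition above) =====
theorem solution_spec : Claim_equal_solution := by
  unfold Claim_equal_solution Spec_solution
  intro n cores _ hpre
  by_cases hle : n ≤ (cores.length : Int)
  · unfold solution solution_alt
    rw [if_pos hle, if_pos hle]
  · have hlt : (cores.length : Int) < n := by omega
    obtain ⟨hne, hp⟩ := hpre hlt
    have hm : 0 < cores.length := List.length_pos_iff.2 hne
    have hm1 : (1 : Int) ≤ (cores.length : Int) := by exact_mod_cast hm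
    have hn2 : 2 ≤ n := by omega
    -- A's side: the binary search finds the first time T with pvFm T ≥ n
    obtain ⟨M, hM⟩ : ∃ M, PySem.List.max? cores (fun c => c) = some M := by
      cases h : PySem.List.max? cores (fun c => c) with
      | none => exact absurd ((PySem.List.max?_eq_none_iff _ _).1 h) hne
      | some M => exact ⟨M, rfl⟩
    have hMmax : ∀ c ∈ cores, c ≤ M := fun c hc => PySem.List.max?_isMax hM c hc
    have hM1 : 1 ≤ M := hp M (PySem.List.max?_mem hM)
    have hFbig : n ≤ pvFm cores (M * n) := pvFm_big hp hne hMmax (by omega)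
    obtain ⟨hT0, hTr, hTF, hTmin⟩ :=
      pvBS_correct hp (n := n) 0 (M * n) le_rfl (by nlinarith) hFbig
        (by intro t h1 h2; omega)
    have hF0 : pvFm cores 0 = (cores.length : Int) := pvFm_zero hp
    have hT1 : 1 ≤ pvBS n cores 0 (M * n) := by
      by_contra h
      have hz : pvBS n cores 0 (M * n) = 0 := by omega
      rw [hz, hF0] at hTF
      omega
    have hFT1 : pvFm cores (pvBS n cores 0 (M * n) - 1) < n :=
      hTmin (pvBS n cores 0 (M * n) - 1) (by omega) (by omega)
    obtain ⟨J, hJeq, hJm, hJdvd, hJRK⟩ :=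
      pvFind_spec hp hT1 hTF cores 0 (pvFinish cores (pvBS n cores 0 (M * n) - 1))
        (by simp) (by omega)
        (by rw [pv_finish_eq]; unfold pvRK pvCD; simp)
        (by rw [pv_finish_eq]; exact hFT1)
    -- B's side: fast-forward start state, then the last pop is the event of rank n - 1
    set D := cores.foldl (fun acc c => acc * c) 1 with hDdef
    set S := (cores.map (fun c => PySem.Int.floordiv D c)).sum with hSdef
    set t0 := max 0 (PySem.Int.floordiv ((n - (cores.length : Int)) * D) S) with ht0def
    set free0 := cores.map (fun c => PySem.Int.floordiv (t0 + c - 1) c * c) with hfree0def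
    set done := (cores.map (fun c => PySem.Int.floordiv (t0 + c - 1) c)).sum with hdonedef
    have hD1 : 1 ≤ D := by
      rw [hDdef]; exact pv_foldl_mul_ge_one hp 1 le_rfl
    have hdvdD : ∀ c ∈ cores, c ∣ D := by
      intro c hc; rw [hDdef]; exact pv_dvd_foldl cores 1 (Or.inl hc)
    have hS1 : 1 ≤ S := by
      rw [hSdef]
      have := pv_sum_map (fun c => PySem.Int.floordiv D c) cores
      rw [this]
      have hterm : ∀ j ∈ Finset.range cores.length,
          (1 : Int) ≤ PySem.Int.floordiv D (pvC cores j) := by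
        intro j hj
        have hjm := Finset.mem_range.1 hj
        have hc := pvC_pos hp hjm
        have hmem : pvC cores j ∈ cores := by
          unfold pvC; rw [List.getD_eq_getElem _ _ hjm]; exact List.getElem_mem hjm
        obtain ⟨k, hk⟩ := hdvdD (pvC cores j) hmem
        have hfdD : PySem.Int.floordiv D (pvC cores j) = k := by
          rw [hk, mul_comm]; exact pv_fd_mul hc
        rw [hfdD]; nlinarith
      have hcard := Finset.card_nsmul_le_sum (Finset.range cores.length) _ 1 hterm
      rw [Finset.card_range, nsmul_eq_mul, mul_one] at hcard
      unfold pvC at hcard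
      omega
    have ht0nn : (0 : Int) ≤ t0 := le_max_left 0 _
    have ht0S : t0 * S ≤ (n - (cores.length : Int)) * D := by
      rw [ht0def]
      rcases max_cases 0 (PySem.Int.floordiv ((n - (cores.length : Int)) * D) S) with
        ⟨h1, _⟩ | ⟨h1, _⟩
      · rw [h1, zero_mul]; nlinarith
      · rw [h1]
        exact (pv_fd_bounds (a := (n - (cores.length : Int)) * D) hS1).1
    have hdonelt : done < n := by
      rw [hdonedef]
      exact pvDone_lt hp hne hD1 hdvdD hSdef ht0nn ht0S hlt
    obtain ⟨hdonenn, hwarm⟩ := pvWarm_inv hp (cores := cores) ht0nn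
    rw [← hdonedef, ← hfree0def] at hwarm
    have hfold : (PySem.List.pyRange 0 (n - done) 1).foldl (fun st _ => pvStep cores st)
          (free0, -1) =
        (fun st => pvStep cores st)^[(n - done).toNat] (free0, -1) := by
      rw [pv_foldl_const (pvStep cores)]
      congr 1
      rw [PySem.List.length_pyRange_one]
      simp
    obtain ⟨_, _, _, _, hlastP⟩ := pvIter_inv hp hne hwarm (n - done).toNat
    obtain ⟨b, hbeq, hbm, hble, hbdvd, hbnn, hbRK⟩ := hlastP (by omega)
    have hcast : ((done.toNat + (n - done).toNat : Nat) : Int) = n := by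
      push_cast
      rw [Int.toNat_of_nonneg hdonenn, Int.toNat_of_nonneg (by omega : (0 : Int) ≤ n - done)]
      ring
    rw [hcast] at hbRK
    -- the two events have the same rank, hence are the same event
    obtain ⟨-, hJb⟩ :=
      pvRK_inj hp (by omega) hbnn hJm hbm hJdvd hbdvd (hJRK.trans hbRK.symm)
    -- assemble
    unfold solution solution_alt
    rw [if_neg hle, if_neg hle]
    simp only [hM, Option.getD_some]
    rw [← hDdef, ← hSdef, ← ht0def, ← hfree0def, ← hdonedef, hfold, hbeq, ← hJb]
    simpa using hJeq
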